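-- pv_equiv track=rewrite | github.com/anurag5398/DSA-Problems | DynamicProgramming/LongestBalancedSubstring.py | LBSlength
-- ===== SOURCE A (Python) =====
-- def LBSlength(A):
--     A = '#'+A
--     stack = [0]
--     maxLength = 0
--     for i, s in enumerate(A):
--         if s == '(' or s == '[' or s == '{':
--             stack.append(i)
--         elif s == ')' and A[stack[-1]] == '(':
--             stack.pop()
--             maxLength = max(i-stack[-1], maxLength)
--         elif s == '}' and A[stack[-1]] == '{':
--             stack.pop()
--             maxLength = max(i-stack[-1], maxLength)
--         elif s == ']' and A[stack[-1]] == '[':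
--             stack.pop()
--             maxLength = max(i-stack[-1], maxLength)
--         else:
--             stack.append(i)
--     return maxLength
-- ===== SOURCE B (Python) =====
-- _MATCH = {')': '(', '}': '{', ']': '['}
--
-- def LBSlength(A):
--     n = len(A)
--     dp = [0] * n  # dp[i] = length of longest valid substring ending at i
--     best = 0
--     for i, c in enumerate(A):
--         opener = _MATCH.get(c)
--         if opener is not None:
--             j = i - (dp[i - 1] if i > 0 else 0) - 1
--             if j >= 0 and A[j] == opener:
--                 dp[i] = (dp[i - 1] if i > 0 else 0) + 2 + (dp[j - 1] if j > 0 else 0)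
--                 if dp[i] > best:
--                     best = dp[i]
--     return best
-- ===== Notes on version B (the rewrite author's own statement) =====
-- stated objective: alternative
-- what changed: Replaced A's explicit stack of unmatched/barrier indices by a dynamic-programming table dp[i] = length of the longest valid bracket substring ending at i, jumping back over already-matched segments instead of popping a stack.
import Mathlib
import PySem

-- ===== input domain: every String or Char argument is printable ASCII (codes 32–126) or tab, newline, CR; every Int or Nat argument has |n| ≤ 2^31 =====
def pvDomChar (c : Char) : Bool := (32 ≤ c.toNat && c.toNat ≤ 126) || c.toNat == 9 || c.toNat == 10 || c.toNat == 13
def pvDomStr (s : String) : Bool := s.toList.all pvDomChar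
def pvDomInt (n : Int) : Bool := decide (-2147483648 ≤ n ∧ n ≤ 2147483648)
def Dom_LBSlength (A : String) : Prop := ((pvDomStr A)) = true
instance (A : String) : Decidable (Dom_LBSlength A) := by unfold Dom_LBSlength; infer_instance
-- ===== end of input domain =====

-- B replaces A's explicit index stack by a dynamic-programming table dp[i] =
-- length of the longest valid bracket substring ending at i (same asymptotic cost,
-- different algorithm/state).

-- ===== PORT A =====
-- one iteration of A's for-loop; state = (stack of indices, maxLength)
def LBSstep (s : List Char) (st : List Int × Int) (p : Int × Char) : List Int × Int :=
  let stack := st.1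
  let maxLength := st.2
  let i := p.1
  let c := p.2
  if c = '(' ∨ c = '[' ∨ c = '{' then (i :: stack, maxLength)
  else if c = ')' ∧ (PySem.List.pyGet? s (stack.headD 0)).getD '#' = '(' then
    (stack.tail, max (i - stack.tail.headD 0) maxLength)
  else if c = '}' ∧ (PySem.List.pyGet? s (stack.headD 0)).getD '#' = '{' then
    (stack.tail, max (i - stack.tail.headD 0) maxLength)
  else if c = ']' ∧ (PySem.List.pyGet? s (stack.headD 0)).getD '#' = '[' then
    (stack.tail, max (i - stack.tail.headD 0) maxLength)
  else (i :: stack, maxLength)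

def LBSlength (A : String) : Int :=
  let A2 := '#' :: A.toList
  ((PySem.List.enumerate A2).foldl (LBSstep A2) ([0], 0)).2

-- ===== PORT B =====
-- _MATCH.get(c): the matching opener of a closing bracket, None otherwise
def pyMatchOpener (c : Char) : Option Char :=
  if c = ')' then some '(' else if c = '}' then some '{' else if c = ']' then some '[' else none

-- one iteration of B's loop; state = (dp table built so far, best)
def LBSaltStep (l : List Char) (st : List Int × Int) (p : Int × Char) : List Int × Int :=
  let dp := st.1
  let best := st.2
  let i := p.1
  let c := p.2
  match pyMatchOpener c with
  | none => (dp ++ [0], best)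
  | some op =>
    let prev := if 0 < i then PySem.List.pyGetD dp (i - 1) 0 else 0
    let j := i - prev - 1
    if 0 ≤ j ∧ (PySem.List.pyGet? l j).getD '#' = op then
      let v := prev + 2 + (if 0 < j then PySem.List.pyGetD dp (j - 1) 0 else 0)
      (dp ++ [v], if best < v then v else best)
    else (dp ++ [0], best)

def LBSlength_alt (A : String) : Int :=
  ((PySem.List.enumerate A.toList).foldl (LBSaltStep A.toList) ([], 0)).2

-- ===== PRECONDITION & SPEC =====
def Spec_LBSlength (A : String) (out : Int) : Prop := out = LBSlength_alt A
instance (A : String) (out : Int) : Decidable (Spec_LBSlength A out) := by unfold Spec_LBSlength; infer_instance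

-- ===== CLAIM =====
def Claim_equal_LBSlength : Prop := ∀ (A : String), Dom_LBSlength A → Spec_LBSlength A (LBSlength A)

-- ===== LEMMAS AND PROOFS =====

-- dp-value at 1-based position i of the sentinel string ('#'+A); Dp dp 0 = 0
def Dp (dp : List Int) (i : Nat) : Int := if i = 0 then 0 else dp.getD (i - 1) 0

-- invariant tying A's stack to B's dp table: below each stack entry u ≥ 1 sits
-- exactly the index u - 1 - dp-length ending at u - 1; the bottom entry is 0
def Chain (dp : List Int) : List Int → Prop
  | [] => False
  | [u] => u = 0
  | u :: v :: rest =>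
      0 ≤ u ∧ u ≤ (dp.length : Int) ∧
      (u = 0 ∨ (1 ≤ u ∧ v = u - 1 - Dp dp (u - 1).toNat)) ∧
      Chain dp (v :: rest)

def StInv (k : Nat) (stack dp : List Int) : Prop :=
  dp.length = k ∧ stack.headD 0 = (k : Int) - Dp dp k ∧ Chain dp stack

lemma Dp_append (dp : List Int) (x : Int) (i : Nat) (h : i ≤ dp.length) :
    Dp (dp ++ [x]) i = Dp dp i := by
  unfold Dp
  rcases Nat.eq_zero_or_pos i with h0 | h0
  · simp [h0]
  · have hlt : i - 1 < dp.length := by omega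
    simp [List.getD_eq_getElem?_getD, List.getElem?_append_left hlt]

lemma Dp_append_last (dp : List Int) (x : Int) : Dp (dp ++ [x]) (dp.length + 1) = x := by
  unfold Dp
  simp [List.getD_eq_getElem?_getD]

lemma chain_append (dp : List Int) (x : Int) : ∀ (st : List Int), Chain dp st → Chain (dp ++ [x]) st
  | [], h => h.elim
  | [u], h => h
  | u :: v :: rest, h => by
      obtain ⟨h1, h2, h3, h4⟩ := h
      refine ⟨h1, by simp; omega, ?_, chain_append dp x (v :: rest) h4⟩
      rcases h3 with h0 | ⟨hu, hv⟩
      · exact Or.inl h0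
      · exact Or.inr ⟨hu, by rw [Dp_append dp x _ (by omega)]; exact hv⟩

lemma chain_head (dp : List Int) : ∀ (st : List Int), Chain dp st →
    0 ≤ st.headD 0 ∧ st.headD 0 ≤ (dp.length : Int)
  | [], h => h.elim
  | [u], h => by simp [Chain] at h; simp [h]
  | u :: v :: rest, h => by
      obtain ⟨h1, h2, _, _⟩ := h
      exact ⟨h1, h2⟩

lemma chain_pop (dp : List Int) : ∀ (st : List Int), Chain dp st → 1 ≤ st.headD 0 →
    ∃ v rest, st = st.headD 0 :: v :: rest ∧
      v = st.headD 0 - 1 - Dp dp (st.headD 0 - 1).toNat ∧ Chain dp (v :: rest)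
  | [], h, _ => h.elim
  | [u], h, hpos => by simp [Chain] at h; simp [h] at hpos
  | u :: v :: rest, h, hpos => by
      obtain ⟨h1, h2, h3, h4⟩ := h
      rcases h3 with h0 | ⟨hu, hv⟩
      · simp [h0] at hpos
      · exact ⟨v, rest, rfl, by simpa using hv, h4⟩

lemma push_inv (k : Nat) (stack dp : List Int) (h : StInv k stack dp) :
    StInv (k + 1) (((k : Int) + 1) :: stack) (dp ++ [0]) := by
  obtain ⟨hlen, hhead, hch⟩ := h
  have hlast : Dp (dp ++ [(0 : Int)]) (k + 1) = 0 := by rw [← hlen]; exact Dp_append_last dp 0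
  refine ⟨by simp [hlen], ?_, ?_⟩
  · simp only [List.headD_cons, hlast]
    push_cast
    ring
  · obtain ⟨v, rest, rfl⟩ : ∃ v rest, stack = v :: rest := by
      cases stack with
      | nil => exact absurd hch (by simp [Chain])
      | cons a b => exact ⟨a, b, rfl⟩
    have hD : Dp (dp ++ [(0 : Int)]) k = Dp dp k := Dp_append dp 0 k (by omega)
    refine ⟨by positivity, by simp [hlen], Or.inr ⟨by omega, ?_⟩, chain_append dp 0 _ hch⟩
    have ht : ((k : Int) + 1 - 1).toNat = k := by omega
    rw [ht, hD]
    simpa using hhead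

lemma pyGet?_cons_pos {α : Type} (x : α) (xs : List α) (t : Int) (h : 1 ≤ t) :
    PySem.List.pyGet? (x :: xs) t = PySem.List.pyGet? xs (t - 1) := by
  obtain ⟨n, rfl⟩ : ∃ n : Nat, t = (n : Int) + 1 := ⟨(t - 1).toNat, by omega⟩
  rw [PySem.List.pyGet?_cons_succ]
  simp

lemma pyMatchOpener_cases (c op : Char) (h : pyMatchOpener c = some op) :
    (c = ')' ∧ op = '(') ∨ (c = '}' ∧ op = '{') ∨ (c = ']' ∧ op = '[') := by
  unfold pyMatchOpener at h
  split_ifs at h with h1 h2 h3 <;> simp_all [eq_comm]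

lemma pyMatchOpener_none (c : Char) (h : pyMatchOpener c = none) :
    c ≠ ')' ∧ c ≠ '}' ∧ c ≠ ']' := by
  unfold pyMatchOpener at h
  split_ifs at h with h1 h2 h3
  simp_all

lemma LBSstep_push (s : List Char) (st : List Int × Int) (i : Int) (c : Char)
    (h : pyMatchOpener c = none) : LBSstep s st (i, c) = (i :: st.1, st.2) := by
  obtain ⟨h1, h2, h3⟩ := pyMatchOpener_none c h
  by_cases ho : c = '(' ∨ c = '[' ∨ c = '{'
  · simp [LBSstep, ho]
  · simp [LBSstep, ho, h1, h2, h3]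

lemma LBSstep_closer (s : List Char) (st : List Int × Int) (i : Int) (c op : Char)
    (h : pyMatchOpener c = some op) :
    LBSstep s st (i, c) =
      if (PySem.List.pyGet? s (st.1.headD 0)).getD '#' = op then
        (st.1.tail, max (i - st.1.tail.headD 0) st.2)
      else (i :: st.1, st.2) := by
  rcases pyMatchOpener_cases c op h with ⟨rfl, rfl⟩ | ⟨rfl, rfl⟩ | ⟨rfl, rfl⟩ <;>
    · simp only [LBSstep]
      split_ifs <;> simp_all

lemma LBSaltStep_none (l : List Char) (st : List Int × Int) (i : Int) (c : Char)
    (h : pyMatchOpener c = none) : LBSaltStep l st (i, c) = (st.1 ++ [0], st.2) := by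
  simp [LBSaltStep, h]

-- one synchronized loop step preserves the invariant and keeps the maxima equal
lemma step_eq (l : List Char) (k : Nat) (stack dp : List Int) (m : Int) (c : Char)
    (hinv : StInv k stack dp) :
    (LBSstep ('#' :: l) (stack, m) ((k : Int) + 1, c)).2
        = (LBSaltStep l (dp, m) ((k : Int), c)).2
    ∧ StInv (k + 1) (LBSstep ('#' :: l) (stack, m) ((k : Int) + 1, c)).1
        (LBSaltStep l (dp, m) ((k : Int), c)).1 := by
  obtain ⟨hlen, hhead, hch⟩ := hinv
  have hhb := chain_head dp stack hch
  cases hmo : pyMatchOpener c with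
  | none =>
      rw [LBSstep_push _ _ _ _ hmo, LBSaltStep_none _ _ _ _ hmo]
      exact ⟨rfl, push_inv k stack dp ⟨hlen, hhead, hch⟩⟩
  | some op =>
      have hop : op ≠ '#' := by
        rcases pyMatchOpener_cases c op hmo with ⟨_, rfl⟩ | ⟨_, rfl⟩ | ⟨_, rfl⟩ <;> decide
      rw [LBSstep_closer _ _ _ _ _ hmo]
      simp only [LBSaltStep, hmo]
      -- B's prev equals Dp dp k
      have hprev : (if 0 < (k : Int) then PySem.List.pyGetD dp ((k : Int) - 1) 0 else 0)
          = Dp dp k := by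
        rcases Nat.eq_zero_or_pos k with h0 | h0
        · simp [h0, Dp]
        · have hcast : ((k : Int) - 1) = ((k - 1 : Nat) : Int) := by omega
          rw [if_pos (by omega : (0 : Int) < k), hcast, PySem.List.pyGetD_natCast]
          unfold Dp
          rw [if_neg (by omega)]
        -- the stack top, as a position in '#'+A
      set t : Int := stack.headD 0 with htdef
      have hj : (k : Int) - (if 0 < (k : Int) then PySem.List.pyGetD dp ((k : Int) - 1) 0 else 0) - 1
          = t - 1 := by rw [hprev]; omega
      by_cases ht : 1 ≤ t
      · -- the top is a real character; both sides read the same char l[t-1]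
        have hreadA : (PySem.List.pyGet? ('#' :: l) t).getD '#'
            = (PySem.List.pyGet? l (t - 1)).getD '#' := by
          rw [pyGet?_cons_pos '#' l t ht]
        by_cases hx : (PySem.List.pyGet? l (t - 1)).getD '#' = op
        · -- matching closer: A pops, B records dp value k+1-v
          obtain ⟨v, rest, hst, hv, hchv⟩ := chain_pop dp stack hch ht
          rw [← htdef] at hst hv
          have hcond : (0 ≤ (k:Int) - (if 0 < (k : Int) then PySem.List.pyGetD dp ((k : Int) - 1) 0 else 0) - 1
              ∧ (PySem.List.pyGet? l ((k:Int) - (if 0 < (k : Int) then PySem.List.pyGetD dp ((k : Int) - 1) 0 else 0) - 1)).getD '#' = op) := by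
            rw [hj]; exact ⟨by omega, hx⟩
          rw [if_pos hcond, if_pos (by rw [hreadA]; exact hx)]
          -- the dp[j-1] term equals Dp dp (t-1)
          have hterm : (if 0 < (k : Int) - (if 0 < (k : Int) then PySem.List.pyGetD dp ((k : Int) - 1) 0 else 0) - 1
              then PySem.List.pyGetD dp ((k:Int) - (if 0 < (k : Int) then PySem.List.pyGetD dp ((k : Int) - 1) 0 else 0) - 1 - 1) 0 else 0)
              = Dp dp (t - 1).toNat := by
            rw [hj]
            by_cases h2 : 2 ≤ t
            · have hc2 : (t - 1 - 1 : Int) = (((t - 2).toNat : Nat) : Int) := by omega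
              rw [if_pos (by omega), hc2, PySem.List.pyGetD_natCast]
              unfold Dp
              rw [if_neg (by omega)]
              congr 1
              omega
            · have ht1 : t = 1 := by omega
              rw [if_neg (by omega)]
              simp [ht1, Dp]
          rw [hterm]
          have hprev' : Dp dp k = (k : Int) - t := by omega
          have hvval : (if 0 < (k : Int) then PySem.List.pyGetD dp ((k : Int) - 1) 0 else 0) + 2
              + Dp dp (t - 1).toNat = (k : Int) + 1 - v := by
            rw [hprev, hprev']
            have : (t - 1).toNat = ((t : Int) - 1).toNat := rfl
            omega
          rw [hvval]
          have htl : stack.tail = v :: rest := by rw [hst]; rfl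
          have hbound : t ≤ (k : Int) := by
            have := hhb.2; rw [hlen] at this; exact this
          constructor
          · -- maxima agree
            rw [htl]
            simp only [List.headD_cons]
            rcases lt_or_ge m ((k : Int) + 1 - v) with hlt | hge
            · rw [if_pos hlt, max_eq_left (by omega)]
            · rw [if_neg (by omega), max_eq_right (by omega)]
          · -- invariant after the pop
            have hlast : Dp (dp ++ [(k : Int) + 1 - v]) (k + 1) = (k : Int) + 1 - v := by
              rw [← hlen]; exact Dp_append_last _ _
            refine ⟨by simp [hlen], ?_, ?_⟩
            · rw [htl]
              simp only [List.headD_cons, hlast]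
              push_cast
              ring
            · rw [htl]; exact chain_append _ _ _ hchv
        · -- closer of the wrong type: both sides treat position as a barrier
          rw [if_neg (by rw [hreadA]; exact hx), if_neg (by rw [hj]; exact fun hh => hx hh.2)]
          exact ⟨rfl, push_inv k stack dp ⟨hlen, hhead, hch⟩⟩
      · -- top is the sentinel: A reads '#', B's j is -1
        have ht0 : t = 0 := by have := hhb.1; omega
        have hA : (PySem.List.pyGet? ('#' :: l) t).getD '#' = '#' := by
          rw [ht0]; rw [PySem.List.pyGet?_zero_cons]; rfl
        rw [if_neg (by rw [hA]; exact fun h => hop h.symm),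
            if_neg (by rw [hj, ht0]; intro hh; omega)]
        exact ⟨rfl, push_inv k stack dp ⟨hlen, hhead, hch⟩⟩

lemma fold_eq (l : List Char) : ∀ (rest : List Char) (k : Nat) (stack dp : List Int) (m : Int),
    l.drop k = rest → StInv k stack dp →
    ((PySem.List.enumerate rest ((k : Int) + 1)).foldl (LBSstep ('#' :: l)) (stack, m)).2
      = ((PySem.List.enumerate rest (k : Int)).foldl (LBSaltStep l) (dp, m)).2 := by
  intro rest
  induction rest with
  | nil => intro k stack dp m _ _; simp [PySem.List.enumerate_nil]
  | cons c rest' ih =>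
      intro k stack dp m hdrop hinv
      have hdrop' : l.drop (k + 1) = rest' := by
        have := congrArg (List.drop 1) hdrop
        simpa [List.drop_drop, Nat.add_comm] using this
      obtain ⟨heq, hinv'⟩ := step_eq l k stack dp m c hinv
      rw [PySem.List.enumerate_cons, PySem.List.enumerate_cons]
      simp only [List.foldl_cons]
      have eA : LBSstep ('#' :: l) (stack, m) ((k : Int) + 1, c)
          = ((LBSstep ('#' :: l) (stack, m) ((k : Int) + 1, c)).1,
             (LBSaltStep l (dp, m) ((k : Int), c)).2) := by rw [← heq]
      rw [eA]
      have hcast1 : ((k : Int) + 1 + 1) = (((k + 1 : Nat) : Int) + 1) := by push_cast; ring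
      have hcast2 : ((k : Int) + 1) = ((k + 1 : Nat) : Int) := by push_cast; ring
      rw [hcast1, hcast2]
      exact ih (k + 1) _ _ _ hdrop' hinv'

-- ===== VERDICT =====
theorem LBSlength_spec : Claim_equal_LBSlength := by
  unfold Claim_equal_LBSlength
  intro A _
  unfold Spec_LBSlength LBSlength LBSlength_alt
  simp only []
  rw [PySem.List.enumerate_cons]
  simp only [List.foldl_cons]
  have h0 : LBSstep ('#' :: A.toList) ([0], 0) (0, '#') = ([0, 0], 0) := by
    simp [LBSstep]
  rw [h0]
  have hinv0 : StInv 0 [0, 0] [] := by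
    refine ⟨rfl, by simp [Dp], ?_⟩
    exact ⟨le_refl 0, le_refl 0, Or.inl rfl, rfl⟩
  have := fold_eq A.toList A.toList 0 [0, 0] [] 0 (by simp) hinv0
  simpa using this
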